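-- pv_equiv track=rewrite | github.com/sumkincpp/CodeTest | comptetive-programming/codejam2019/2019-04-28-CodeJam-1B/2/fair_fight1_MLE.py | max_range
-- ===== SOURCE A (Python) =====
-- def max_range(data):
--     size = len(data)
--
--     table = [[None for i in range(0, size)] for i in range(0, size)]
--
--     for i in range(0, size):
--         table[i][i] = data[i]
--
--     # 1,0 2,1 3,2 4,3 5,4
--     # 2,0 2,1 2,2 3,2
--     for x in range(1, size):
--         for y in range(0, size - x):
--             table[x+y][y] = max(table[x+y-1][y], table[x+y][y+1])
--
--     return table
-- ===== SOURCE B (Python) =====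
-- def max_range(data):
--     size = len(data)
--     table = [[None] * size for _ in range(size)]
--     for j in range(size):
--         running = data[j]
--         table[j][j] = running
--         for i in range(j + 1, size):
--             running = max(running, data[i])
--             table[i][j] = running
--     return table
-- ===== Notes on version B (the rewrite author's own statement) =====
-- stated objective: alternative
-- what changed: Replaces the diagonal-by-diagonal DP that combines two adjacent sub-results per cell with a per-left-endpoint running maximum that fills each column in one left-to-right sweep, avoiding all table reads.
import Mathlib
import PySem

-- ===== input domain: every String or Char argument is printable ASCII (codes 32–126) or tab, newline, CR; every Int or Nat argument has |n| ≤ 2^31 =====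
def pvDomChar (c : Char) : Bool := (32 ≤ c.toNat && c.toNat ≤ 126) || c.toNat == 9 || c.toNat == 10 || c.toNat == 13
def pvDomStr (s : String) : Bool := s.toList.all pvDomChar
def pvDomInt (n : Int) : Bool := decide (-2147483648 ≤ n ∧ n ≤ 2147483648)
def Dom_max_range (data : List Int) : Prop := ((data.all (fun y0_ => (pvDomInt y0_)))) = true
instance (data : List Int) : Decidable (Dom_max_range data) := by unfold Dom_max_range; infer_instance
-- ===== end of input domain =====

-- B replaces A's diagonal-by-diagonal DP (each cell = max of two adjacent sub-results) by a
-- running maximum swept from each left endpoint; same O(n^2) cost, no table reads.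

-- shared helpers: Python's `table[i][j] = v` and `table[i][j]` on a list of lists
def pvSet2 (t : List (List (Option Int))) (i j : Nat) (v : Option Int) : List (List (Option Int)) :=
  t.set i ((t.getD i []).set j v)

def pvCell (t : List (List (Option Int))) (i j : Nat) : Option Int :=
  (t.getD i []).getD j none

-- ===== PORT A =====
-- Python's max(a, b) on two table cells; in A both cells are always already-filled ints,
-- so the none branch is never reached (Python would raise TypeError there).
def pvMaxOpt (a b : Option Int) : Option Int :=
  match a, b with
  | some x, some y => some (max x y)
  | _, _ => none

def max_range (data : List Int) : List (List (Option Int)) :=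
  let size := data.length
  -- table = [[None for i in range(size)] for i in range(size)]
  let table0 := (List.range size).map (fun _ => (List.range size).map (fun _ => (none : Option Int)))
  -- for i in range(size): table[i][i] = data[i]
  let table1 := (List.range size).foldl (fun t i => pvSet2 t i i (some (data.getD i 0))) table0
  -- for x in range(1, size): for y in range(size - x): …   (x = x' + 1)
  (List.range (size - 1)).foldl (fun t x' =>
    (List.range (size - (x' + 1))).foldl (fun t y =>
      pvSet2 t (x' + 1 + y) y
        (pvMaxOpt (pvCell t (x' + 1 + y - 1) y) (pvCell t (x' + 1 + y) (y + 1)))) t) table1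

-- ===== PORT B =====
def max_range_alt (data : List Int) : List (List (Option Int)) :=
  let size := data.length
  -- table = [[None] * size for _ in range(size)]; per column j: running max swept rightwards
  -- state = (table, running); i = j + 1 + k
  (List.range size).foldl (fun t j =>
    ((List.range (size - (j + 1))).foldl
      (fun (p : List (List (Option Int)) × Int) k =>
        (pvSet2 p.1 (j + 1 + k) j (some (max p.2 (data.getD (j + 1 + k) 0))),
          max p.2 (data.getD (j + 1 + k) 0)))
      (pvSet2 t j j (some (data.getD j 0)), data.getD j 0)).1)
    ((List.range size).map (fun _ => List.replicate size (none : Option Int)))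

-- ===== PRECONDITION & SPEC =====
def Spec_max_range (data : List Int) (out : List (List (Option Int))) : Prop := out = max_range_alt data
instance (data : List Int) (out : List (List (Option Int))) : Decidable (Spec_max_range data out) := by unfold Spec_max_range; infer_instance

-- ===== CLAIM (what is proved, stated in full; the proofs are below) =====
def Claim_equal_max_range : Prop := ∀ (data : List Int), Dom_max_range data → Spec_max_range data (max_range data)

-- ===== LEMMAS AND PROOFS =====

-- maximum of data[j..i] (for j ≤ i), built left to right
def pvSegMax (data : List Int) (j : Nat) : Nat → Int
  | 0 => data.getD j 0
  | i + 1 => if i + 1 ≤ j then data.getD j 0 else max (pvSegMax data j i) (data.getD (i + 1) 0)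

lemma segMax_self (data : List Int) (j : Nat) : pvSegMax data j j = data.getD j 0 := by
  cases j <;> simp [pvSegMax]

lemma segMax_succ (data : List Int) {j i : Nat} (h : j ≤ i) :
    pvSegMax data j (i + 1) = max (pvSegMax data j i) (data.getD (i + 1) 0) := by
  rw [pvSegMax, if_neg (by omega)]

lemma segMax_peel (data : List Int) {j i : Nat} (h : j < i) :
    pvSegMax data j i = max (data.getD j 0) (pvSegMax data (j + 1) i) := by
  induction i with
  | zero => omega
  | succ i ih =>
    rcases Nat.lt_or_ge j i with h' | h'
    · rw [segMax_succ data (Nat.le_of_lt h'), ih h', segMax_succ data h', max_assoc]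
    · have hji : j = i := by omega
      subst hji
      rw [segMax_succ data (le_refl j), segMax_self, segMax_self]

lemma segMax_combine (data : List Int) {j i : Nat} (h : j ≤ i) :
    max (pvSegMax data j i) (pvSegMax data (j + 1) (i + 1)) = pvSegMax data j (i + 1) := by
  rcases Nat.lt_or_ge j i with h' | h'
  · rw [segMax_succ data (Nat.le_of_lt h'), segMax_peel data h', segMax_succ data h',
      ← max_assoc, max_assoc (data.getD j 0), max_self]
  · have hji : j = i := by omega
    subst hji
    rw [segMax_succ data (le_refl j), segMax_self, segMax_self]

-- shape: n rows, each of length n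
def pvShape (t : List (List (Option Int))) (n : Nat) : Prop :=
  t.length = n ∧ ∀ r ∈ t, r.length = n

lemma pv_getD_eq {α : Type} (l : List α) (j : Nat) (d : α) : l.getD j d = (l[j]?).getD d := rfl

lemma pv_getD_set {α : Type} (l : List α) (i j : Nat) (v d : α) :
    (l.set i v).getD j d = if i = j ∧ i < l.length then v else l.getD j d := by
  rw [pv_getD_eq, pv_getD_eq, List.getElem?_set]
  by_cases h1 : i = j
  · subst h1
    by_cases h2 : i < l.length
    · rw [if_pos rfl, if_pos h2, if_pos ⟨rfl, h2⟩]
      rfl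
    · rw [if_pos rfl, if_neg h2, if_neg (fun hh => h2 hh.2), List.getElem?_eq_none (by omega)]
  · rw [if_neg h1, if_neg (fun hh => h1 hh.1)]

lemma shape_set2 {t : List (List (Option Int))} {n i : Nat} (hs : pvShape t n) (hi : i < n)
    (j : Nat) (v : Option Int) : pvShape (pvSet2 t i j v) n := by
  obtain ⟨hl, hr⟩ := hs
  refine ⟨by simp [pvSet2, hl], ?_⟩
  intro r hrm
  rcases List.mem_or_eq_of_mem_set hrm with h | h
  · exact hr r h
  · subst h
    rw [List.length_set]
    have hlen : i < t.length := by rw [hl]; exact hi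
    rw [List.getD_eq_getElem _ _ hlen]
    exact hr _ (List.getElem_mem hlen)

lemma cell_set2 {t : List (List (Option Int))} {n : Nat} {i j : Nat} (hs : pvShape t n)
    (hi : i < n) (hj : j < n) (v : Option Int) (a b : Nat) :
    pvCell (pvSet2 t i j v) a b = if a = i ∧ b = j then v else pvCell t a b := by
  have hlen : i < t.length := by rw [hs.1]; exact hi
  have hrow : t.getD i [] = t[i] := List.getD_eq_getElem _ _ hlen
  have hrlen : (t.getD i []).length = n := by rw [hrow]; exact hs.2 _ (List.getElem_mem hlen)
  unfold pvCell pvSet2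
  rw [pv_getD_set]
  by_cases ha : a = i
  · subst ha
    rw [if_pos ⟨rfl, hlen⟩, pv_getD_set]
    by_cases hb : b = j
    · subst hb
      rw [if_pos ⟨rfl, by rw [hrlen]; exact hj⟩, if_pos ⟨rfl, rfl⟩]
    · rw [if_neg (by tauto), if_neg (by tauto)]
  · rw [if_neg (by tauto), if_neg (by tauto)]

lemma eq_of_cells {t t' : List (List (Option Int))} {n : Nat}
    (hs : pvShape t n) (hs' : pvShape t' n)
    (h : ∀ a b, a < n → b < n → pvCell t a b = pvCell t' a b) : t = t' := by
  have hlen : t.length = t'.length := by rw [hs.1, hs'.1]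
  apply List.ext_getElem hlen
  intro i h1 h2
  have hrl : (t[i]).length = n := hs.2 _ (List.getElem_mem h1)
  have hrl' : (t'[i]).length = n := hs'.2 _ (List.getElem_mem h2)
  apply List.ext_getElem (by rw [hrl, hrl'])
  intro b hb1 hb2
  have hi : i < n := by rw [← hs.1]; exact h1
  have hbn : b < n := by rw [← hrl]; exact hb1
  have hc := h i b hi hbn
  unfold pvCell at hc
  rw [List.getD_eq_getElem _ _ h1, List.getD_eq_getElem _ _ h2] at hc
  rw [List.getD_eq_getElem _ _ hb1, List.getD_eq_getElem _ _ hb2] at hc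
  exact hc

-- the all-None starting tables of the two ports
lemma shape_table0A (n : Nat) :
    pvShape ((List.range n).map (fun _ => (List.range n).map (fun _ => (none : Option Int)))) n := by
  refine ⟨by simp, ?_⟩
  intro r hr
  simp only [List.mem_map] at hr
  obtain ⟨_, _, rfl⟩ := hr
  simp

lemma cell_const_rows (row : List (Option Int)) (hrow : ∀ b, row.getD b none = none)
    (n a b : Nat) : pvCell ((List.range n).map (fun _ => row)) a b = none := by
  unfold pvCell
  rcases Nat.lt_or_ge a n with h | h
  · rw [List.getD_eq_getElem _ [] (by simpa using h)]
    simp only [List.getElem_map]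
    exact hrow b
  · rw [pv_getD_eq ((List.range n).map (fun _ => row)) a [],
      List.getElem?_eq_none (by simpa using h)]
    rfl

lemma cell_table0A (n a b : Nat) :
    pvCell ((List.range n).map (fun _ => (List.range n).map (fun _ => (none : Option Int)))) a b = none := by
  refine cell_const_rows _ ?_ n a b
  intro b
  rcases Nat.lt_or_ge b n with h | h
  · rw [List.getD_eq_getElem _ _ (by simpa using h)]
    simp
  · rw [pv_getD_eq, List.getElem?_eq_none (by simpa using h)]
    rfl

lemma shape_table0B (n : Nat) :
    pvShape ((List.range n).map (fun _ => List.replicate n (none : Option Int))) n := by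
  refine ⟨by simp, ?_⟩
  intro r hr
  simp only [List.mem_map] at hr
  obtain ⟨_, _, rfl⟩ := hr
  simp

lemma cell_table0B (n a b : Nat) :
    pvCell ((List.range n).map (fun _ => List.replicate n (none : Option Int))) a b = none := by
  refine cell_const_rows _ ?_ n a b
  intro b
  rcases Nat.lt_or_ge b n with h | h
  · rw [List.getD_eq_getElem _ _ (by simpa using h)]
    simp
  · rw [pv_getD_eq, List.getElem?_eq_none (by simpa using h)]
    rfl

-- ===== the diagonal loops of A =====

lemma foldA1_inv (data : List Int) :
    ∀ m, m ≤ data.length →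
      pvShape ((List.range m).foldl (fun t i => pvSet2 t i i (some (data.getD i 0)))
        ((List.range data.length).map (fun _ => (List.range data.length).map (fun _ => (none : Option Int))))) data.length ∧
      ∀ a b : Nat,
        pvCell ((List.range m).foldl (fun t i => pvSet2 t i i (some (data.getD i 0)))
          ((List.range data.length).map (fun _ => (List.range data.length).map (fun _ => (none : Option Int))))) a b
        = if a = b ∧ a < m then some (data.getD a 0) else none := by
  intro m
  induction m with
  | zero =>
    intro _
    refine ⟨shape_table0A _, ?_⟩
    intro a b
    rw [List.range_zero, List.foldl_nil, cell_table0A, if_neg (by omega)]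
  | succ m ih =>
    intro hm
    obtain ⟨hs, hc⟩ := ih (by omega)
    rw [List.range_succ, List.foldl_append, List.foldl_cons, List.foldl_nil]
    refine ⟨shape_set2 hs (by omega) _ _, ?_⟩
    intro a b
    refine (cell_set2 hs (by omega) (by omega) _ a b).trans ?_
    rw [hc a b]
    by_cases h : a = m ∧ b = m
    · obtain ⟨rfl, rfl⟩ := h
      rw [if_pos ⟨rfl, rfl⟩, if_pos (by omega)]
    · rw [if_neg h]
      split_ifs with h1 h2 <;> first | rfl | (exfalso; omega)

lemma foldA2_inner (data : List Int) (x : Nat) (hx1 : 1 ≤ x) (hxn : x < data.length)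
    (t0 : List (List (Option Int))) (hs0 : pvShape t0 data.length)
    (ht0 : ∀ a b : Nat, pvCell t0 a b =
      if b ≤ a ∧ a < data.length ∧ a - b < x then some (pvSegMax data b a) else none) :
    ∀ m, m ≤ data.length - x →
      pvShape ((List.range m).foldl (fun t y =>
        pvSet2 t (x + y) y (pvMaxOpt (pvCell t (x + y - 1) y) (pvCell t (x + y) (y + 1)))) t0) data.length ∧
      ∀ a b : Nat,
        pvCell ((List.range m).foldl (fun t y =>
          pvSet2 t (x + y) y (pvMaxOpt (pvCell t (x + y - 1) y) (pvCell t (x + y) (y + 1)))) t0) a b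
        = if b ≤ a ∧ a < data.length ∧ (a - b < x ∨ (a - b = x ∧ b < m))
          then some (pvSegMax data b a) else none := by
  intro m
  induction m with
  | zero =>
    intro _
    refine ⟨hs0, ?_⟩
    intro a b
    rw [List.range_zero, List.foldl_nil, ht0 a b]
    split_ifs with h1 h2 <;> first | rfl | (exfalso; omega)
  | succ m ih =>
    intro hm
    obtain ⟨hs, hc⟩ := ih (by omega)
    rw [List.range_succ, List.foldl_append, List.foldl_cons, List.foldl_nil]
    have hr1 := (hc (x + m - 1) m).trans (if_pos (by omega))
    have hr2 := (hc (x + m) (m + 1)).trans (if_pos (by omega))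
    have hv : max (pvSegMax data m (x + m - 1)) (pvSegMax data (m + 1) (x + m)) = pvSegMax data m (x + m) := by
      have e1 : x + m - 1 + 1 = x + m := by omega
      have h2 := segMax_combine data (show m ≤ x + m - 1 by omega)
      rw [e1] at h2
      exact h2
    refine ⟨shape_set2 hs (by omega) _ _, ?_⟩
    intro a b
    refine (cell_set2 hs (by omega) (by omega) _ a b).trans ?_
    rw [hr1, hr2]
    by_cases h : a = x + m ∧ b = m
    · obtain ⟨rfl, rfl⟩ := h
      rw [if_pos ⟨rfl, rfl⟩, if_pos (by omega)]
      show pvMaxOpt (some _) (some _) = _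
      rw [pvMaxOpt]
      exact congrArg some hv
    · rw [if_neg h, hc a b]
      split_ifs with h1 h2 <;> first | rfl | (exfalso; omega)

lemma foldA2_outer (data : List Int) :
    ∀ m, m ≤ data.length - 1 →
      pvShape ((List.range m).foldl (fun t x' =>
        (List.range (data.length - (x' + 1))).foldl (fun t y =>
          pvSet2 t (x' + 1 + y) y
            (pvMaxOpt (pvCell t (x' + 1 + y - 1) y) (pvCell t (x' + 1 + y) (y + 1)))) t)
        ((List.range data.length).foldl (fun t i => pvSet2 t i i (some (data.getD i 0)))
          ((List.range data.length).map (fun _ => (List.range data.length).map (fun _ => (none : Option Int)))))) data.length ∧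
      ∀ a b : Nat,
        pvCell ((List.range m).foldl (fun t x' =>
          (List.range (data.length - (x' + 1))).foldl (fun t y =>
            pvSet2 t (x' + 1 + y) y
              (pvMaxOpt (pvCell t (x' + 1 + y - 1) y) (pvCell t (x' + 1 + y) (y + 1)))) t)
          ((List.range data.length).foldl (fun t i => pvSet2 t i i (some (data.getD i 0)))
            ((List.range data.length).map (fun _ => (List.range data.length).map (fun _ => (none : Option Int)))))) a b
        = if b ≤ a ∧ a < data.length ∧ a - b < m + 1 then some (pvSegMax data b a) else none := by
  intro m
  induction m with
  | zero =>
    intro _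
    obtain ⟨hs, hc⟩ := foldA1_inv data data.length le_rfl
    rw [List.range_zero, List.foldl_nil]
    refine ⟨hs, ?_⟩
    intro a b
    rw [hc a b]
    by_cases h : a = b ∧ a < data.length
    · obtain ⟨rfl, h2⟩ := h
      rw [if_pos ⟨rfl, h2⟩, if_pos (by omega), segMax_self]
    · rw [if_neg h, if_neg (by omega)]
  | succ m ih =>
    intro hm
    obtain ⟨hs, hc⟩ := ih (by omega)
    rw [List.range_succ, List.foldl_append, List.foldl_cons, List.foldl_nil]
    obtain ⟨hs', hc'⟩ := foldA2_inner data (m + 1) (by omega) (by omega) _ hs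
      (fun a b => (hc a b)) (data.length - (m + 1)) le_rfl
    refine ⟨hs', ?_⟩
    intro a b
    refine (hc' a b).trans ?_
    split_ifs with h1 h2 <;> first | rfl | (exfalso; omega)

-- ===== the per-left-endpoint sweep of B =====

lemma foldB_inner (data : List Int) (j : Nat) (hj : j < data.length)
    (t0 : List (List (Option Int))) (hs0 : pvShape t0 data.length)
    (ht0 : ∀ a b : Nat, pvCell t0 a b =
      if b ≤ a ∧ a < data.length ∧ (b < j ∨ (b = j ∧ a ≤ j)) then some (pvSegMax data b a) else none) :
    ∀ m, m ≤ data.length - (j + 1) →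
      pvShape ((List.range m).foldl
        (fun (p : List (List (Option Int)) × Int) k =>
          (pvSet2 p.1 (j + 1 + k) j (some (max p.2 (data.getD (j + 1 + k) 0))),
            max p.2 (data.getD (j + 1 + k) 0))) (t0, data.getD j 0)).1 data.length ∧
      ((List.range m).foldl
        (fun (p : List (List (Option Int)) × Int) k =>
          (pvSet2 p.1 (j + 1 + k) j (some (max p.2 (data.getD (j + 1 + k) 0))),
            max p.2 (data.getD (j + 1 + k) 0))) (t0, data.getD j 0)).2 = pvSegMax data j (j + m) ∧
      ∀ a b : Nat,
        pvCell ((List.range m).foldl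
          (fun (p : List (List (Option Int)) × Int) k =>
            (pvSet2 p.1 (j + 1 + k) j (some (max p.2 (data.getD (j + 1 + k) 0))),
              max p.2 (data.getD (j + 1 + k) 0))) (t0, data.getD j 0)).1 a b
        = if b ≤ a ∧ a < data.length ∧ (b < j ∨ (b = j ∧ a ≤ j + m))
          then some (pvSegMax data b a) else none := by
  intro m
  induction m with
  | zero =>
    intro _
    rw [List.range_zero, List.foldl_nil]
    exact ⟨hs0, (segMax_self data j).symm, fun a b => ht0 a b⟩
  | succ m ih =>
    intro hm
    obtain ⟨hs, hr, hc⟩ := ih (by omega)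
    rw [List.range_succ, List.foldl_append, List.foldl_cons, List.foldl_nil]
    have e1 : j + 1 + m = j + m + 1 := by omega
    have hr' : max ((List.range m).foldl
        (fun (p : List (List (Option Int)) × Int) k =>
          (pvSet2 p.1 (j + 1 + k) j (some (max p.2 (data.getD (j + 1 + k) 0))),
            max p.2 (data.getD (j + 1 + k) 0))) (t0, data.getD j 0)).2 (data.getD (j + 1 + m) 0)
        = pvSegMax data j (j + (m + 1)) := by
      have e3 : j + (m + 1) = j + m + 1 := by omega
      rw [hr, e1, e3, ← segMax_succ data (by omega)]
    refine ⟨shape_set2 hs (by omega) _ _, hr', ?_⟩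
    intro a b
    refine (cell_set2 hs (by omega) (by omega) _ a b).trans ?_
    by_cases h : a = j + 1 + m ∧ b = j
    · obtain ⟨ha, hb⟩ := h
      rw [if_pos ⟨ha, hb⟩, if_pos (by omega), hr', ha, hb]
      have e2 : j + (m + 1) = j + 1 + m := by omega
      rw [e2]
    · rw [if_neg h, hc a b]
      split_ifs with h1 h2 <;> first | rfl | (exfalso; omega)

lemma foldB_outer (data : List Int) :
    ∀ m, m ≤ data.length →
      pvShape ((List.range m).foldl (fun t j =>
        ((List.range (data.length - (j + 1))).foldl
          (fun (p : List (List (Option Int)) × Int) k =>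
            (pvSet2 p.1 (j + 1 + k) j (some (max p.2 (data.getD (j + 1 + k) 0))),
              max p.2 (data.getD (j + 1 + k) 0)))
          (pvSet2 t j j (some (data.getD j 0)), data.getD j 0)).1)
        ((List.range data.length).map (fun _ => List.replicate data.length (none : Option Int)))) data.length ∧
      ∀ a b : Nat,
        pvCell ((List.range m).foldl (fun t j =>
          ((List.range (data.length - (j + 1))).foldl
            (fun (p : List (List (Option Int)) × Int) k =>
              (pvSet2 p.1 (j + 1 + k) j (some (max p.2 (data.getD (j + 1 + k) 0))),
                max p.2 (data.getD (j + 1 + k) 0)))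
            (pvSet2 t j j (some (data.getD j 0)), data.getD j 0)).1)
          ((List.range data.length).map (fun _ => List.replicate data.length (none : Option Int)))) a b
        = if b ≤ a ∧ a < data.length ∧ b < m then some (pvSegMax data b a) else none := by
  intro m
  induction m with
  | zero =>
    intro _
    refine ⟨shape_table0B _, ?_⟩
    intro a b
    rw [List.range_zero, List.foldl_nil, cell_table0B, if_neg (by omega)]
  | succ m ih =>
    intro hm
    obtain ⟨hs, hc⟩ := ih (by omega)
    rw [List.range_succ, List.foldl_append, List.foldl_cons, List.foldl_nil]
    have hs1 := shape_set2 hs (show m < data.length by omega) m (some (data.getD m 0))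
    have hc1 : ∀ a b : Nat, pvCell (pvSet2 ((List.range m).foldl (fun t j =>
          ((List.range (data.length - (j + 1))).foldl
            (fun (p : List (List (Option Int)) × Int) k =>
              (pvSet2 p.1 (j + 1 + k) j (some (max p.2 (data.getD (j + 1 + k) 0))),
                max p.2 (data.getD (j + 1 + k) 0)))
            (pvSet2 t j j (some (data.getD j 0)), data.getD j 0)).1)
          ((List.range data.length).map (fun _ => List.replicate data.length (none : Option Int))))
          m m (some (data.getD m 0))) a b
        = if b ≤ a ∧ a < data.length ∧ (b < m ∨ (b = m ∧ a ≤ m)) then some (pvSegMax data b a) else none := by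
      intro a b
      refine (cell_set2 hs (by omega) (by omega) _ a b).trans ?_
      by_cases h : a = m ∧ b = m
      · obtain ⟨rfl, rfl⟩ := h
        rw [if_pos ⟨rfl, rfl⟩, if_pos (by omega), segMax_self]
      · rw [if_neg h, hc a b]
        split_ifs with h1 h2 <;> first | rfl | (exfalso; omega)
    obtain ⟨hs2, _, hc2⟩ := foldB_inner data m (by omega) _ hs1 hc1 (data.length - (m + 1)) le_rfl
    refine ⟨hs2, ?_⟩
    intro a b
    refine (hc2 a b).trans ?_
    split_ifs with h1 h2 <;> first | rfl | (exfalso; omega)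

lemma cells_A (data : List Int) :
    pvShape (max_range data) data.length ∧
    ∀ a b : Nat, pvCell (max_range data) a b
      = if b ≤ a ∧ a < data.length then some (pvSegMax data b a) else none := by
  obtain ⟨hs, hc⟩ := foldA2_outer data (data.length - 1) le_rfl
  refine ⟨hs, ?_⟩
  intro a b
  refine (show pvCell (max_range data) a b
      = if b ≤ a ∧ a < data.length ∧ a - b < data.length - 1 + 1 then some (pvSegMax data b a) else none
    from hc a b).trans ?_
  split_ifs with h1 h2 <;> first | rfl | (exfalso; omega)

lemma cells_B (data : List Int) :
    pvShape (max_range_alt data) data.length ∧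
    ∀ a b : Nat, pvCell (max_range_alt data) a b
      = if b ≤ a ∧ a < data.length then some (pvSegMax data b a) else none := by
  obtain ⟨hs, hc⟩ := foldB_outer data data.length le_rfl
  refine ⟨hs, ?_⟩
  intro a b
  refine (show pvCell (max_range_alt data) a b
      = if b ≤ a ∧ a < data.length ∧ b < data.length then some (pvSegMax data b a) else none
    from hc a b).trans ?_
  split_ifs with h1 h2 <;> first | rfl | (exfalso; omega)

lemma max_range_eq (data : List Int) : max_range data = max_range_alt data := by
  obtain ⟨hsa, hca⟩ := cells_A data
  obtain ⟨hsb, hcb⟩ := cells_B data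
  exact eq_of_cells hsa hsb (fun a b _ _ => (hca a b).trans (hcb a b).symm)

-- ===== VERDICT (by name: the statement is the Claim_ definition above) =====
theorem max_range_spec : Claim_equal_max_range := by
  intro data _
  unfold Spec_max_range
  exact max_range_eq data
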